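-- pv_equiv track=rewrite | github.com/annefou/FIP-Analyzer | fip_reader.py | organize_by_principle_from_json
-- ===== SOURCE A (Python) =====
-- def organize_by_principle_from_json(declarations: list) -> dict:
--     """Organize declarations by FAIR principle from JSON data."""
--     organized = {}
--
--     for principle_key in ["F1", "F2", "F3", "F4", "A1", "A1.1", "A1.2", "A2",
--                           "I1", "I2", "I3", "R1", "R1.1", "R1.2", "R1.3"]:
--         organized[principle_key] = {"data": [], "metadata": []}
--
--     for decl in declarations:
--         principle = decl.get("principle")
--         dtype = decl.get("data_type", "data").lower()
--
--         if principle and principle in organized: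
--             resource_info = {
--                 "label": decl.get("resource_label", "Unknown"),
--                 "uri": decl.get("resource_uri"),
--                 "type": decl.get("resource_type", "current"),
--             }
--
--             if dtype == "data":
--                 organized[principle]["data"].append(resource_info)
--             else:
--                 organized[principle]["metadata"].append(resource_info)
--
--     return organized
-- ===== SOURCE B (Python) =====
-- _PRINCIPLE_KEYS = ["F1", "F2", "F3", "F4", "A1", "A1.1", "A1.2", "A2",
--                    "I1", "I2", "I3", "R1", "R1.1", "R1.2", "R1.3"]
--
--
-- def _resource_info(decl):
--     return {
--         "label": decl.get("resource_label", "Unknown"),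
--         "uri": decl.get("resource_uri"),
--         "type": decl.get("resource_type", "current"),
--     }
--
--
-- def _is_data(decl):
--     return decl.get("data_type", "data").lower() == "data"
--
--
-- def organize_by_principle_from_json(declarations: list) -> dict:
--     """Organize declarations by FAIR principle: per-principle filtering scans."""
--     return {
--         key: {
--             "data": [_resource_info(d) for d in declarations
--                      if d.get("principle") == key and _is_data(d)],
--             "metadata": [_resource_info(d) for d in declarations
--                          if d.get("principle") == key and not _is_data(d)],
--         }
--         for key in _PRINCIPLE_KEYS
--     }
-- ===== Notes on version B (the rewrite author's own statement) =====
-- stated objective: alternative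
-- what changed: Replaces A's single dispatch pass that appends each declaration into a mutable per-principle dict with an outer loop over the 15 fixed principle keys that, per key, filters the declarations list twice (data / metadata) and maps them to resource_info dicts.
-- crash fix: A raises AttributeError (None.lower()) whenever any declaration stores None under 'data_type'; B only inspects 'data_type' on declarations whose 'principle' is one of the 15 keys, so when no such declaration matches a key B returns the organized dict (those entries contribute nothing). — e.g. on organize_by_principle_from_json([[("data_type", none)]]): A raises AttributeError, B returns [("F1", [("data", []), ("metadata", [])]), ("F2", [("data", []), ("metadata", [])]), ("F3", [("data", []), ("metadata",…
import Mathlib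
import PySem

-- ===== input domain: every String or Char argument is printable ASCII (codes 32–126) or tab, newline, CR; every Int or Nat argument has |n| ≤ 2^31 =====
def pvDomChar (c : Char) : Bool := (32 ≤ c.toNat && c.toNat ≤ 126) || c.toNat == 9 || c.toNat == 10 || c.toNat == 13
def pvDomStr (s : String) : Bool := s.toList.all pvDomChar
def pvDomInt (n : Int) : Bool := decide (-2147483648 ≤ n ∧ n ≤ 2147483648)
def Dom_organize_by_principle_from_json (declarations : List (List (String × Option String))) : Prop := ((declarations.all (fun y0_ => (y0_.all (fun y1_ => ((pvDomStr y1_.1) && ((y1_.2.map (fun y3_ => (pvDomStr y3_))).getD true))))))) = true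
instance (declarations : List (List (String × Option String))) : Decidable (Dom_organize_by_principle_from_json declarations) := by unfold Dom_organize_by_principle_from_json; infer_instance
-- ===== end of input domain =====

-- B replaces A's single dispatch pass over the declarations by a per-principle pair of filtering
-- scans (outer loop over the 15 fixed keys); objective: alternative decomposition, same result.

-- ===== PORT A =====
-- one iteration of A's `for decl in declarations` loop, acting on the `organized` dict
def orgStepA (organized : PySem.Dict String (PySem.Dict String (List (List (String × Option String)))))
    (decl : List (String × Option String)) :
    PySem.Dict String (PySem.Dict String (List (List (String × Option String)))) :=
  let d := PySem.Dict.mk decl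
  let principle : Option String := (d.get? "principle").getD none
  -- decl.get("data_type", "data").lower(); when the stored value is None Python raises
  -- AttributeError (excluded by Pre_): "" stands in for that unreachable case
  let dtype := PySem.Str.lower (match d.get? "data_type" with | none => "data" | some v => v.getD "")
  match principle with
  | none => organized
  | some p =>
    if p ≠ "" ∧ organized.contains p then
      let resource_info : List (String × Option String) :=
        [("label", (d.get? "resource_label").getD (some "Unknown")),
         ("uri", (d.get? "resource_uri").getD none),
         ("type", (d.get? "resource_type").getD (some "current"))]
      if dtype = "data" then
        organized.modify p PySem.Dict.empty (fun inner => inner.modify "data" [] (· ++ [resource_info]))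
      else
        organized.modify p PySem.Dict.empty (fun inner => inner.modify "metadata" [] (· ++ [resource_info]))
    else organized

def organize_by_principle_from_json (declarations : List (List (String × Option String))) :
    List (String × List (String × List (List (String × Option String)))) :=
  let organized :=
    (["F1", "F2", "F3", "F4", "A1", "A1.1", "A1.2", "A2",
      "I1", "I2", "I3", "R1", "R1.1", "R1.2", "R1.3"]).foldl
      (fun o k => o.insert k (PySem.Dict.mk [("data", []), ("metadata", [])])) PySem.Dict.empty
  ((declarations.foldl orgStepA organized).items.map (fun kv => (kv.1, kv.2.items)))

-- ===== PORT B =====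
def altPrincipleKeys : List String :=
  ["F1", "F2", "F3", "F4", "A1", "A1.1", "A1.2", "A2",
   "I1", "I2", "I3", "R1", "R1.1", "R1.2", "R1.3"]

def altResourceInfo (decl : List (String × Option String)) : List (String × Option String) :=
  let d := PySem.Dict.mk decl
  [("label", (d.get? "resource_label").getD (some "Unknown")),
   ("uri", (d.get? "resource_uri").getD none),
   ("type", (d.get? "resource_type").getD (some "current"))]

-- decl.get("data_type", "data").lower() == "data"; "" stands in for the value-None case
-- (AttributeError in Python, excluded by Pre_ whenever B reaches it)
def altIsData (decl : List (String × Option String)) : Bool :=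
  PySem.Str.lower (match (PySem.Dict.mk decl).get? "data_type" with
    | none => "data" | some v => v.getD "") == "data"

def organize_by_principle_from_json_alt (declarations : List (List (String × Option String))) :
    List (String × List (String × List (List (String × Option String)))) :=
  altPrincipleKeys.map (fun key =>
    (key,
      [("data",
         (declarations.filter (fun d =>
           ((PySem.Dict.mk d).get? "principle" == some (some key)) && altIsData d)).map altResourceInfo),
       ("metadata",
         (declarations.filter (fun d =>
           ((PySem.Dict.mk d).get? "principle" == some (some key)) && !(altIsData d))).map altResourceInfo)]))

-- ===== PRECONDITION & SPEC =====
-- Pre_ excludes exactly the inputs on which Python A raises AttributeError: a declaration whose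
-- "data_type" entry is present but None (None.lower() is evaluated for every declaration).
def Pre_organize_by_principle_from_json (declarations : List (List (String × Option String))) : Prop :=
  ∀ decl ∈ declarations, (PySem.Dict.mk decl).get? "data_type" ≠ some none
instance (declarations : List (List (String × Option String))) : Decidable (Pre_organize_by_principle_from_json declarations) := by unfold Pre_organize_by_principle_from_json; infer_instance

def pvWitness_organize_by_principle_from_json : (List (List (String × Option String))) :=
  [[("principle", some "F1"), ("data_type", some "Data"), ("resource_uri", some "u")],
   [("principle", some "A1.1"), ("data_type", some "other")]]

-- A raises AttributeError whenever some declaration stores None under "data_type"; B only looks at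
-- "data_type" on declarations whose "principle" is one of the 15 keys, so when no None-"data_type"
-- declaration has such a principle B returns the organized dict (ignoring those entries' types).
def Raises_organize_by_principle_from_json (declarations : List (List (String × Option String))) : Prop :=
  (∃ decl ∈ declarations, (PySem.Dict.mk decl).get? "data_type" = some none) ∧
  (∀ decl ∈ declarations, (PySem.Dict.mk decl).get? "data_type" = some none →
    ∀ k ∈ (["F1", "F2", "F3", "F4", "A1", "A1.1", "A1.2", "A2",
            "I1", "I2", "I3", "R1", "R1.1", "R1.2", "R1.3"] : List String),
      (PySem.Dict.mk decl).get? "principle" ≠ some (some k))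
instance (declarations : List (List (String × Option String))) : Decidable (Raises_organize_by_principle_from_json declarations) := by unfold Raises_organize_by_principle_from_json; infer_instance

def pvRaiseWitness_organize_by_principle_from_json : (List (List (String × Option String))) :=
  [[("data_type", none)]]

def pvRaiseWitnessOut_organize_by_principle_from_json : List (String × List (String × List (List (String × Option String)))) :=
  [("F1", [("data", []), ("metadata", [])]), ("F2", [("data", []), ("metadata", [])]),
   ("F3", [("data", []), ("metadata", [])]), ("F4", [("data", []), ("metadata", [])]),
   ("A1", [("data", []), ("metadata", [])]), ("A1.1", [("data", []), ("metadata", [])]),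
   ("A1.2", [("data", []), ("metadata", [])]), ("A2", [("data", []), ("metadata", [])]),
   ("I1", [("data", []), ("metadata", [])]), ("I2", [("data", []), ("metadata", [])]),
   ("I3", [("data", []), ("metadata", [])]), ("R1", [("data", []), ("metadata", [])]),
   ("R1.1", [("data", []), ("metadata", [])]), ("R1.2", [("data", []), ("metadata", [])]),
   ("R1.3", [("data", []), ("metadata", [])])]

def Spec_organize_by_principle_from_json (declarations : List (List (String × Option String))) (out : List (String × List (String × List (List (String × Option String))))) : Prop := out = organize_by_principle_from_json_alt declarations
instance (declarations : List (List (String × Option String))) (out : List (String × List (String × List (List (String × Option String))))) : Decidable (Spec_organize_by_principle_from_json declarations out) := by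
  unfold Spec_organize_by_principle_from_json
  letI i1 : DecidableEq (List (List (String × Option String))) := inferInstance
  letI i2 : DecidableEq (List (String × List (List (String × Option String)))) := inferInstance
  letI i3 : DecidableEq (String × List (String × List (List (String × Option String)))) := inferInstance
  infer_instance

-- ===== CLAIM (what is proved, stated in full; the proofs are below) =====
def Claim_equal_organize_by_principle_from_json : Prop := ∀ (declarations : List (List (String × Option String))), Dom_organize_by_principle_from_json declarations → Pre_organize_by_principle_from_json declarations → Spec_organize_by_principle_from_json declarations (organize_by_principle_from_json declarations)

def Claim_raises_organize_by_principle_from_json : Prop :=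
  (∀ (declarations : List (List (String × Option String))), Dom_organize_by_principle_from_json declarations → Raises_organize_by_principle_from_json declarations → ¬ Pre_organize_by_principle_from_json declarations) ∧
  (Dom_organize_by_principle_from_json (pvRaiseWitness_organize_by_principle_from_json) ∧ Raises_organize_by_principle_from_json (pvRaiseWitness_organize_by_principle_from_json) ∧ organize_by_principle_from_json_alt (pvRaiseWitness_organize_by_principle_from_json) = pvRaiseWitnessOut_organize_by_principle_from_json)

-- ===== LEMMAS AND PROOFS =====

-- the evolving `organized` dict always has the fixed 15 keys, with the per-key "data"/"metadata"
-- lists given by the two functions fd, fm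
def mkOrg (L : List String) (fd fm : String → List (List (String × Option String))) :
    PySem.Dict String (PySem.Dict String (List (List (String × Option String)))) :=
  PySem.Dict.mk (L.map (fun k => (k, PySem.Dict.mk [("data", fd k), ("metadata", fm k)])))

theorem contains_mkOrg (L : List String) (fd fm) (p : String) :
    (mkOrg L fd fm).contains p = decide (p ∈ L) := by
  induction L with
  | nil => rfl
  | cons k t ih =>
    simp only [mkOrg, PySem.Dict.contains, List.map_cons, List.any_cons] at *
    by_cases h : k = p
    · subst h; simp [ih]
    · have h2 : ¬ p = k := fun e => h e.symm
      simp [h, h2, ih]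

theorem getD_mkOrg (L : List String) (fd fm) (p : String) (hp : p ∈ L) (dflt) :
    (mkOrg L fd fm).getD p dflt = PySem.Dict.mk [("data", fd p), ("metadata", fm p)] := by
  induction L with
  | nil => cases hp
  | cons k t ih =>
    rcases List.mem_cons.mp hp with h | h
    · subst h
      simp [mkOrg, PySem.Dict.getD_eq_get?_getD, PySem.Dict.get?_mk_cons]
    · by_cases hk : k = p
      · subst hk
        simp [mkOrg, PySem.Dict.getD_eq_get?_getD, PySem.Dict.get?_mk_cons]
      · have := ih h
        simpa [mkOrg, PySem.Dict.getD_eq_get?_getD, PySem.Dict.get?_mk_cons, hk] using this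

theorem modify_mkOrg (L : List String) (fd fm) (p : String) (hp : p ∈ L) (dflt f) :
    (mkOrg L fd fm).modify p dflt f
      = PySem.Dict.mk (L.map (fun k =>
          (k, if k = p then f (PySem.Dict.mk [("data", fd p), ("metadata", fm p)])
              else PySem.Dict.mk [("data", fd k), ("metadata", fm k)]))) := by
  have hc : (mkOrg L fd fm).contains p = true := by simp [contains_mkOrg, hp]
  simp only [PySem.Dict.modify, getD_mkOrg L fd fm p hp, PySem.Dict.insert, hc, if_pos]
  apply PySem.Dict.ext
  simp only [mkOrg, List.map_map]
  apply List.map_congr_left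
  intro k _
  by_cases hk : k = p <;> simp [hk]

-- a mkOrg with function arguments agreeing on L is the same dict
theorem mkOrg_congr (L : List String) (fd fm fd' fm')
    (hd : ∀ k ∈ L, fd k = fd' k) (hm : ∀ k ∈ L, fm k = fm' k) :
    mkOrg L fd fm = mkOrg L fd' fm' := by
  unfold mkOrg
  congr 1
  apply List.map_congr_left
  intro k hk
  rw [hd k hk, hm k hk]

-- B's per-key "data" list, the quantity A's loop accumulates
def dataOf (key : String) (ds : List (List (String × Option String))) :
    List (List (String × Option String)) :=
  (ds.filter (fun d => ((PySem.Dict.mk d).get? "principle" == some (some key)) && altIsData d)).map altResourceInfo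

def metaOf (key : String) (ds : List (List (String × Option String))) :
    List (List (String × Option String)) :=
  (ds.filter (fun d => ((PySem.Dict.mk d).get? "principle" == some (some key)) && !(altIsData d))).map altResourceInfo

theorem inner_modify_data (a b : List (List (String × Option String))) (r : List (String × Option String)) :
    (PySem.Dict.mk [("data", a), ("metadata", b)]).modify "data" [] (· ++ [r])
      = PySem.Dict.mk [("data", a ++ [r]), ("metadata", b)] := rfl

theorem inner_modify_meta (a b : List (List (String × Option String))) (r : List (String × Option String)) :
    (PySem.Dict.mk [("data", a), ("metadata", b)]).modify "metadata" [] (· ++ [r])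
      = PySem.Dict.mk [("data", a), ("metadata", b ++ [r])] := rfl

theorem no_empty_key : ∀ k ∈ altPrincipleKeys, k ≠ "" := by decide

theorem step_inv (d : List (String × Option String)) (fd fm) :
    orgStepA (mkOrg altPrincipleKeys fd fm) d
      = mkOrg altPrincipleKeys (fun k => fd k ++ dataOf k [d]) (fun k => fm k ++ metaOf k [d]) := by
  unfold orgStepA
  cases hP : (PySem.Dict.mk d).get? "principle" with
  | none =>
    simp only [hP, Option.getD_none]
    refine (mkOrg_congr _ _ _ _ _ ?_ ?_).symm <;>
      · intro k _
        simp [dataOf, metaOf, List.filter, hP]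
  | some v =>
    cases v with
    | none =>
      simp only [hP, Option.getD_some]
      refine (mkOrg_congr _ _ _ _ _ ?_ ?_).symm <;>
        · intro k _
          simp [dataOf, metaOf, List.filter, hP]
    | some p =>
      simp only [hP, Option.getD_some]
      by_cases hp : p ∈ altPrincipleKeys
      · have hne : p ≠ "" := no_empty_key p hp
        have hc : (mkOrg altPrincipleKeys fd fm).contains p = true := by
          simp [contains_mkOrg, hp]
        rw [if_pos ⟨hne, hc⟩]
        by_cases hdt : altIsData d
        · have hdt' : PySem.Str.lower (match (PySem.Dict.mk d).get? "data_type" with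
              | none => "data" | some v => v.getD "") = "data" := by
            simpa [altIsData] using hdt
          rw [if_pos hdt', modify_mkOrg _ _ _ _ hp]
          apply PySem.Dict.ext
          simp only [mkOrg]
          apply List.map_congr_left
          intro k hk
          by_cases hkp : k = p
          · subst hkp
            simp [inner_modify_data, dataOf, metaOf, List.filter, hP, hdt, altResourceInfo]
          · have hpk : ¬ p = k := fun e => hkp e.symm
            have hne' : ¬ ((PySem.Dict.mk d).get? "principle" == some (some k)) = true := by
              simp [hP, hpk]
            simp [hkp, dataOf, metaOf, List.filter, hne']
        · have hdt' : ¬ PySem.Str.lower (match (PySem.Dict.mk d).get? "data_type" with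
              | none => "data" | some v => v.getD "") = "data" := by
            simpa [altIsData] using hdt
          rw [if_neg hdt', modify_mkOrg _ _ _ _ hp]
          apply PySem.Dict.ext
          simp only [mkOrg]
          apply List.map_congr_left
          intro k hk
          by_cases hkp : k = p
          · subst hkp
            simp [inner_modify_meta, dataOf, metaOf, List.filter, hP, hdt, altResourceInfo]
          · have hpk : ¬ p = k := fun e => hkp e.symm
            have hne' : ¬ ((PySem.Dict.mk d).get? "principle" == some (some k)) = true := by
              simp [hP, hpk]
            simp [hkp, dataOf, metaOf, List.filter, hne']
      · have hc : (mkOrg altPrincipleKeys fd fm).contains p = false := by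
          simp [contains_mkOrg, hp]
        rw [if_neg (by simp [hc])]
        refine (mkOrg_congr _ _ _ _ _ ?_ ?_).symm <;>
          · intro k hk
            have : ¬ ((PySem.Dict.mk d).get? "principle" == some (some k)) = true := by
              simp [hP]; rintro rfl; exact hp hk
            simp [dataOf, metaOf, List.filter, this]

theorem foldl_inv (ds : List (List (String × Option String))) (fd fm) :
    ds.foldl orgStepA (mkOrg altPrincipleKeys fd fm)
      = mkOrg altPrincipleKeys (fun k => fd k ++ dataOf k ds) (fun k => fm k ++ metaOf k ds) := by
  induction ds generalizing fd fm with
  | nil =>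
    simp only [List.foldl_nil]
    refine mkOrg_congr _ _ _ _ _ ?_ ?_ <;> · intro k _; simp [dataOf, metaOf]
  | cons d t ih =>
    rw [List.foldl_cons, step_inv, ih]
    refine mkOrg_congr _ _ _ _ _ ?_ ?_ <;>
      · intro k _
        simp [dataOf, metaOf, List.filter_cons]
        split <;> simp

-- ===== VERDICT (by name: the statement is the Claim_ definition above) =====
theorem organize_by_principle_from_json_spec : Claim_equal_organize_by_principle_from_json := by
  intro ds _ _
  unfold Spec_organize_by_principle_from_json
  rw [show organize_by_principle_from_json ds
        = (ds.foldl orgStepA (mkOrg altPrincipleKeys (fun _ => []) (fun _ => []))).items.map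
            (fun kv => (kv.1, kv.2.items)) from rfl]
  rw [foldl_inv]
  unfold organize_by_principle_from_json_alt mkOrg
  simp only [List.map_map]
  apply List.map_congr_left
  intro k _
  simp [dataOf, metaOf]

theorem organize_by_principle_from_json_raises : Claim_raises_organize_by_principle_from_json := by
  unfold Claim_raises_organize_by_principle_from_json
  refine ⟨?_, by decide, by decide, by rfl⟩
  intro ds _ hr hpre
  obtain ⟨d, hd, hnone⟩ := hr.1
  exact hpre d hd hnone

theorem organize_by_principle_from_json_raises_ok :
    Raises_organize_by_principle_from_json pvRaiseWitness_organize_by_principle_from_json :=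
  organize_by_principle_from_json_raises.2.2.1
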